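-- pv_equiv track=rewrite | github.com/RioWeil/aoc-2020 | Day6/day6.py | count_matching_letters
-- ===== SOURCE A (Python) =====
-- def count_matching_letters(low):
--     """
--     Returns the count of letters common to all words in a list of words.
--     """
--     letters_to_check = []
--     firstw = low[0]
--     counter = 0
--     for i in range(len(firstw)):
--         letters_to_check.append(firstw[i:i+1])
--     for letter in letters_to_check:
--         f = lambda word: letter in word
--         if all(f(x) for x in low):
--             counter = counter + 1
--     return counter
-- ===== SOURCE B (Python) =====
-- def count_matching_letters(low):
--     """
--     Returns the count of letters common to all words in a list of words.
--     """
--     firstw = low[0]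
--     counts = {}
--     for word in low:
--         for c in set(word):
--             counts[c] = counts.get(c, 0) + 1
--     n = len(low)
--     return sum(1 for c in firstw if counts.get(c, 0) == n)
-- ===== Notes on version B (the rewrite author's own statement) =====
-- stated objective: alternative
-- what changed: Instead of re-scanning every word for each letter of the first word (nested passes), B makes one pass building a dict counting in how many words each character occurs, then one pass over the first word counting characters whose count equals len(low).
import Mathlib
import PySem

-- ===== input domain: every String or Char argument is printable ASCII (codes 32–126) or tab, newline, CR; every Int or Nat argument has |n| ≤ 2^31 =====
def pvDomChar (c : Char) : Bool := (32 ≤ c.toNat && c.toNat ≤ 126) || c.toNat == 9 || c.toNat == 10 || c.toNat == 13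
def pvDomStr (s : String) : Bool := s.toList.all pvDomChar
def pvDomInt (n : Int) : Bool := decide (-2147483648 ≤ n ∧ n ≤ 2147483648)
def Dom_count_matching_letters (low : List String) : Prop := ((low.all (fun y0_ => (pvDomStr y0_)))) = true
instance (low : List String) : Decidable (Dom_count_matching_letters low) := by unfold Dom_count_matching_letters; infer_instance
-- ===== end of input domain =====

-- B replaces A's nested rescans (each first-word letter tested against every word) by one counting
-- pass over all words plus one pass over the first word; alternative decomposition, same result.

-- ===== PORT A =====
def count_matching_letters : List String → Int
  | [] => 0   -- unreachable under Pre_ (Python A raises IndexError on [])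
  | firstw :: rest =>
    let low := firstw :: rest
    let letters_to_check :=
      (PySem.List.pyRange 0 (PySem.Str.len firstw) 1).foldl
        (fun acc i => acc ++ [PySem.Str.slice firstw (some i) (some (i + 1))]) []
    letters_to_check.foldl
      (fun counter letter =>
        if low.all (fun x => PySem.Str.isIn letter x) then counter + 1 else counter) 0

-- ===== PORT B =====
def count_matching_letters_alt : List String → Int
  | [] => 0   -- unreachable under Pre_ (Python B raises IndexError on [])
  | firstw :: rest =>
    let low := firstw :: rest
    let counts := low.foldl
      (fun d word => (PySem.Set.ofList word.toList).foldl (fun d c => d.modify c 0 (· + 1)) d)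
      PySem.Dict.empty
    let n : Int := low.length
    firstw.toList.foldl (fun acc c => if counts.getD c 0 == n then acc + 1 else acc) 0

-- ===== PRECONDITION & SPEC =====
-- Pre_ excludes only the empty list, on which both A and B raise IndexError (low[0]).
def Pre_count_matching_letters (low : List String) : Prop := low ≠ []
instance (low : List String) : Decidable (Pre_count_matching_letters low) := by
  unfold Pre_count_matching_letters; infer_instance
def pvWitness_count_matching_letters : List String := ["ab", "b"]

def Spec_count_matching_letters (low : List String) (out : Int) : Prop := out = count_matching_letters_alt low
instance (low : List String) (out : Int) : Decidable (Spec_count_matching_letters low out) := by unfold Spec_count_matching_letters; infer_instance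

-- ===== CLAIM (what is proved, stated in full; the proofs are below) =====
def Claim_equal_count_matching_letters : Prop := ∀ (low : List String), Dom_count_matching_letters low → Pre_count_matching_letters low → Spec_count_matching_letters low (count_matching_letters low)

-- ===== LEMMAS AND PROOFS =====

-- a one-character list is an infix exactly when the character occurs ('letter in word')
theorem singleton_infix_iff_mem {α : Type} (c : α) (l : List α) : [c] <:+: l ↔ c ∈ l := by
  constructor
  · intro h; exact (List.singleton_sublist).1 h.sublist
  · intro h
    obtain ⟨s, t, rfl⟩ := List.append_of_mem h
    exact ⟨s, t, by simp⟩

-- B's counter dict maps c to the number of words containing c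
theorem counts_getD (low : List String) (c : Char) (d : PySem.Dict Char Int) :
    (low.foldl (fun d word => (PySem.Set.ofList word.toList).foldl (fun d c => d.modify c 0 (· + 1)) d) d).getD c 0
      = d.getD c 0 + (low.countP (fun word => decide (c ∈ word.toList)) : Int) := by
  induction low generalizing d with
  | nil => simp
  | cons w rest ih =>
    rw [List.foldl_cons, ih, PySem.Dict.getD_foldl_modify_add_one, List.countP_cons]
    by_cases h : c ∈ w.toList
    · rw [List.count_eq_one_of_mem (PySem.Set.nodup_ofList _) ((PySem.Set.mem_ofList _ _).2 h)]
      simp [h]; ring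
    · rw [List.count_eq_zero_of_not_mem (fun hm => h ((PySem.Set.mem_ofList _ _).1 hm))]
      simp [h]

-- A's letters_to_check list is the one-character strings of firstw, in order
theorem letters_eq (w : String) :
    ((PySem.List.pyRange 0 (PySem.Str.len w) 1).foldl
        (fun acc i => acc ++ [PySem.Str.slice w (some i) (some (i + 1))]) [])
      = w.toList.map (fun c => String.ofList [c]) := by
  rw [PySem.List.foldl_append_singleton_eq_map]
  apply List.ext_getElem
  · simp [PySem.List.length_pyRange_one]
  · intro k h1 h2
    have hk : k < w.toList.length := by simpa using h2
    simp only [List.nil_append, List.getElem_map, PySem.List.getElem_pyRange_one]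
    apply String.toList_injective
    rw [PySem.Str.toList_slice, String.toList_ofList]
    simp only [zero_add]
    have h1' : ((k:Int) + 1) = ((k:Int) + ((1:Nat):Int)) := by norm_num
    rw [h1', PySem.Chars.slice_eq_listSlice, PySem.List.slice_natCast_add]
    rw [List.drop_eq_getElem_cons hk]
    rfl

theorem ports_agree_cons (w : String) (rest : List String) :
    count_matching_letters (w :: rest) = count_matching_letters_alt (w :: rest) := by
  simp only [count_matching_letters, count_matching_letters_alt]
  rw [letters_eq, PySem.List.foldl_if_add_one, PySem.List.foldl_if_add_one, List.countP_map]
  congr 1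
  congr 1
  apply List.countP_congr
  intro c _
  simp only [Function.comp_apply]
  rw [counts_getD, PySem.Dict.getD_empty, zero_add]
  simp only [List.all_eq_true, beq_iff_eq, Nat.cast_inj]
  rw [List.countP_eq_length]
  simp [PySem.Chars.isIn_iff_infix, singleton_infix_iff_mem]

-- ===== VERDICT (by name: the statement is the Claim_ definition above) =====
theorem count_matching_letters_spec : Claim_equal_count_matching_letters := by
  intro low _ hpre
  unfold Spec_count_matching_letters
  match low with
  | [] => exact absurd rfl hpre
  | w :: rest => exact ports_agree_cons w rest
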